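-- pv_equiv track=rewrite | github.com/1005281342/LeetCodePro | zs/194/2.py | getFolderNames
-- ===== SOURCE A (Python) =====
-- from typing import List
--
-- def getFolderNames(names: List[str]) -> List[str]:
--
--     dd = dict()
--     ans = list()
--     for name in names:
--         if dd.get(name) is None:
--             ans.append(name)
--             dd[name] = 1
--         else:
--             new_name = name + "(" + str(dd[name]) + ")"
--             while dd.get(new_name) is not None:
--                 dd[name] += 1
--                 new_name = name + "(" + str(dd[name]) + ")"
--             ans.append(new_name)
--             dd[name] += 1
--             dd[new_name] = 1
--     return ans
-- ===== SOURCE B (Python) =====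
-- from typing import List
--
-- def getFolderNames(names: List[str]) -> List[str]:
--     # simpler: one 'seen' set of used names; on a clash scan k = 1, 2, ... for the first free suffix
--     seen = set()
--     ans = []
--     for name in names:
--         if name in seen:
--             k = 1
--             while name + "(" + str(k) + ")" in seen:
--                 k += 1
--             new_name = name + "(" + str(k) + ")"
--             ans.append(new_name)
--             seen.add(new_name)
--         else:
--             ans.append(name)
--             seen.add(name)
--     return ans
-- ===== Notes on version B (the rewrite author's own statement) =====
-- stated objective: simpler
-- what changed: B replaces A's dict of per-name resume counters (whose values steer where the suffix search restarts) by a single 'seen' set and, on each clash, rescans suffixes from k=1 for the first free candidate, so no numeric state is maintained between names.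
import Mathlib
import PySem

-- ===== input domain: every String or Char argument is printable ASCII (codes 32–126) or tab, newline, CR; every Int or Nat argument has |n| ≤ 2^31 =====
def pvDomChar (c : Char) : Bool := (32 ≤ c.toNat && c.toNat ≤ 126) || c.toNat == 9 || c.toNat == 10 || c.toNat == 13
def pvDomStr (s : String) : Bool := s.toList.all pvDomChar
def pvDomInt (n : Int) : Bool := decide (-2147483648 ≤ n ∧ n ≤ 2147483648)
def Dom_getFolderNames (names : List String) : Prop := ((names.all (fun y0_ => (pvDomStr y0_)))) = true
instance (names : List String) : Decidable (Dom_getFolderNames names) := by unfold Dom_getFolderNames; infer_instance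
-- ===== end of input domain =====

-- getFolderNames: B drops A's dict of per-name resume counters and keeps only a 'seen' set,
-- rescanning suffixes from 1 on each clash (simpler state, same output).


-- ===== PORT A =====
-- name + "(" + str(k) + ")"  (built on the List Char side; exact for str(k) via PySem.Int.toChars)
def pvCand (name : String) (k : Int) : String :=
  String.ofList (name.toList ++ '(' :: (PySem.Int.toChars k ++ [')']))

-- the 'while dd.get(new_name) is not None: dd[name] += 1; new_name = …' loop of A;
-- fuel = dd.size + 1 at the call site, proved sufficient below (the loop always exits before that).
-- dd.getD name 0 stands for dd[name]: name is always a key here, so the default is never read.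
def pvLoopA (name : String) (dd : PySem.Dict String Int) : Nat → PySem.Dict String Int
  | 0 => dd
  | fuel + 1 =>
    if (dd.get? (pvCand name (dd.getD name 0))).isSome then
      pvLoopA name (dd.insert name (dd.getD name 0 + 1)) fuel
    else dd

-- one iteration of A's for-loop, state (dd, ans)
def pvStepA (st : PySem.Dict String Int × List String) (name : String) :
    PySem.Dict String Int × List String :=
  match st with
  | (dd, ans) =>
    match dd.get? name with
    | none => (dd.insert name 1, ans ++ [name])
    | some _ =>
      let dd' := pvLoopA name dd (dd.size + 1)
      let newName := pvCand name (dd'.getD name 0)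
      (((dd'.insert name (dd'.getD name 0 + 1)).insert newName 1), ans ++ [newName])

def getFolderNames (names : List String) : List String :=
  (names.foldl pvStepA (PySem.Dict.empty, [])).2

-- ===== PORT B =====
-- the 'k = 1; while name+"("+str(k)+")" in seen: k += 1' scan of B;
-- fuel = seen.length + 1 at the call site, proved sufficient below.
def pvScanB (seen : PySem.Set String) (name : String) (k : Int) : Nat → Int
  | 0 => k
  | fuel + 1 =>
    if PySem.Set.contains seen (pvCand name k) then pvScanB seen name (k + 1) fuel else k

-- one iteration of B's for-loop, state (seen, ans)
def pvStepB (st : PySem.Set String × List String) (name : String) :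
    PySem.Set String × List String :=
  match st with
  | (seen, ans) =>
    if PySem.Set.contains seen name then
      let k := pvScanB seen name 1 (seen.length + 1)
      let newName := pvCand name k
      (PySem.Set.add seen newName, ans ++ [newName])
    else (PySem.Set.add seen name, ans ++ [name])

def getFolderNames_alt (names : List String) : List String :=
  (names.foldl pvStepB (PySem.Set.empty, [])).2

-- ===== PRECONDITION & SPEC =====
def Spec_getFolderNames (names : List String) (out : List String) : Prop := out = getFolderNames_alt names
instance (names : List String) (out : List String) : Decidable (Spec_getFolderNames names out) := by unfold Spec_getFolderNames; infer_instance

-- ===== CLAIM (what is proved, stated in full; the proofs are below) =====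
def Claim_equal_getFolderNames : Prop := ∀ (names : List String), Dom_getFolderNames names → Spec_getFolderNames names (getFolderNames names)

-- ===== LEMMAS AND PROOFS =====

def pvDecRep (n : Nat) : List Char :=
  if _h : n < 10 then [Nat.digitChar n]
  else pvDecRep (n / 10) ++ [Nat.digitChar (n % 10)]
  termination_by n
  decreasing_by exact Nat.div_lt_self (by omega) (by norm_num)

theorem pvDecRep_lt {n : Nat} (h : n < 10) : pvDecRep n = [Nat.digitChar n] := by
  rw [pvDecRep]; simp [h]

theorem pvDecRep_ge {n : Nat} (h : ¬ n < 10) :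
    pvDecRep n = pvDecRep (n / 10) ++ [Nat.digitChar (n % 10)] := by
  conv_lhs => rw [pvDecRep]
  simp [h]

theorem pvDecRep_ne_nil (n : Nat) : pvDecRep n ≠ [] := by
  by_cases h : n < 10
  · rw [pvDecRep_lt h]; simp
  · rw [pvDecRep_ge h]; simp

theorem pvToDigitsCore_eq (fuel : Nat) : ∀ (n : Nat) (acc : List Char), n < fuel →
    Nat.toDigitsCore 10 fuel n acc = pvDecRep n ++ acc := by
  induction fuel with
  | zero => omega
  | succ f ih =>
    intro n acc h
    rw [Nat.toDigitsCore]
    by_cases h10 : n < 10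
    · have : n / 10 = 0 := Nat.div_eq_of_lt h10
      simp only [this]
      rw [pvDecRep_lt h10, Nat.mod_eq_of_lt h10]
      simp
    · have hne : n / 10 ≠ 0 := by omega
      simp only [if_neg hne]
      rw [ih (n / 10) _ (by omega), pvDecRep_ge h10]
      simp

theorem pvDigitChar_inj (a b : Nat) (ha : a < 10) (hb : b < 10)
    (h : Nat.digitChar a = Nat.digitChar b) : a = b := by
  interval_cases a <;> interval_cases b <;> simp_all [Nat.digitChar]

theorem pvDecRep_inj (m : Nat) : ∀ n, pvDecRep m = pvDecRep n → m = n := by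
  induction m using Nat.strong_induction_on with
  | _ m ih =>
    intro n h
    by_cases hm : m < 10 <;> by_cases hn : n < 10
    · rw [pvDecRep_lt hm, pvDecRep_lt hn] at h
      exact pvDigitChar_inj m n hm hn (by simpa using h)
    · rw [pvDecRep_lt hm, pvDecRep_ge hn] at h
      have hl := congrArg List.length h
      cases e : pvDecRep (n / 10) with
      | nil => exact absurd e (pvDecRep_ne_nil (n / 10))
      | cons a l => rw [e] at hl; simp [List.length_append] at hl
    · rw [pvDecRep_ge hm, pvDecRep_lt hn] at h
      have hl := congrArg List.length h
      cases e : pvDecRep (m / 10) with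
      | nil => exact absurd e (pvDecRep_ne_nil (m / 10))
      | cons a l => rw [e] at hl; simp [List.length_append] at hl
    · rw [pvDecRep_ge hm, pvDecRep_ge hn] at h
      obtain ⟨h1, h2⟩ := List.append_inj' h (by simp)
      have e1 : m / 10 = n / 10 := ih (m / 10) (Nat.div_lt_self (by omega) (by norm_num)) _ h1
      have e2 : m % 10 = n % 10 :=
        pvDigitChar_inj _ _ (by omega) (by omega) (by simpa using h2)
      omega

theorem pvToChars_inj {m n : Int} (hm : 1 ≤ m) (hn : 1 ≤ n)
    (h : PySem.Int.toChars m = PySem.Int.toChars n) : m = n := by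
  unfold PySem.Int.toChars at h
  rw [if_neg (by omega), if_neg (by omega)] at h
  unfold Nat.toDigits at h
  rw [pvToDigitsCore_eq _ _ _ (by omega), pvToDigitsCore_eq _ _ _ (by omega)] at h
  simp only [List.append_nil] at h
  have := pvDecRep_inj _ _ h
  omega


theorem pvCand_inj {name : String} {v w : Int} (hv : 1 ≤ v) (hw : 1 ≤ w)
    (h : pvCand name v = pvCand name w) : v = w := by
  unfold pvCand at h
  have h2 := congrArg String.toList h
  simp only [String.toList_ofList] at h2
  have h3 := List.append_cancel_left h2
  simp only [List.cons.injEq, true_and] at h3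
  exact pvToChars_inj hv hw (List.append_cancel_right h3)

theorem pvCand_ne_name (name : String) (k : Int) : pvCand name k ≠ name := by
  intro h
  have h2 := congrArg (fun s => s.toList.length) h
  simp [pvCand, String.toList_ofList] at h2

theorem pvExistsFree (L : List String) (name : String) (v : Int) (hv : 1 ≤ v) :
    ∃ n : Nat, n ≤ L.length ∧ pvCand name (v + (n : Int)) ∉ L := by
  by_contra hc
  push Not at hc
  have hsub : ((List.range (L.length + 1)).map (fun n : Nat => pvCand name (v + (n : Int)))) ⊆ L := by
    intro x hx
    simp only [List.mem_map, List.mem_range] at hx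
    obtain ⟨n, hn, rfl⟩ := hx
    exact hc n (by omega)
  have hnd : ((List.range (L.length + 1)).map (fun n : Nat => pvCand name (v + (n : Int)))).Nodup := by
    refine List.Nodup.map_on ?_ (List.nodup_range)
    intro a _ b _ hab
    have := pvCand_inj (by omega) (by omega) hab
    omega
  have := List.Subperm.length_le (List.subperm_of_subset hnd hsub)
  simp at this

theorem pvLoopA_spec (name : String) :
    ∀ (fuel : Nat) (dd : PySem.Dict String Int) (v : Int),
      dd.get? name = some v →
      (∃ n : Nat, n < fuel ∧ pvCand name (v + (n : Int)) ∉ dd.keys) →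
      ∃ k : Int, v ≤ k ∧ pvCand name k ∉ dd.keys ∧
        (∀ j : Int, v ≤ j → j < k → pvCand name j ∈ dd.keys) ∧
        (pvLoopA name dd fuel).get? name = some k ∧
        (pvLoopA name dd fuel).keys = dd.keys ∧
        (∀ s : String, s ≠ name → (pvLoopA name dd fuel).get? s = dd.get? s) := by
  intro fuel
  induction fuel with
  | zero => intro dd v hv ⟨n, hn, _⟩; omega
  | succ f ih =>
    intro dd v hv hex
    have hgd : dd.getD name 0 = v := PySem.Dict.getD_of_get?_eq_some _ 0 hv
    rw [pvLoopA]
    by_cases hc : (dd.get? (pvCand name (dd.getD name 0))).isSome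
    · rw [if_pos hc]
      rw [hgd] at hc
      have hin : pvCand name v ∈ dd.keys := by
        rw [← PySem.Dict.contains_iff_mem_keys, PySem.Dict.contains_eq_isSome_get?]
        exact hc
      set dd1 := dd.insert name (dd.getD name 0 + 1) with hdd1
      have hk1 : dd1.keys = dd.keys := by
        rw [hdd1]
        exact PySem.Dict.keys_insert_of_contains _ _
          (by rw [PySem.Dict.contains_eq_isSome_get?, hv]; rfl)
      have hg1 : dd1.get? name = some (v + 1) := by
        rw [hdd1, hgd]; exact PySem.Dict.get?_insert_self _ _ _
      obtain ⟨n, hn, hfree⟩ := hex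
      have hn0 : n ≠ 0 := by
        intro h0; rw [h0] at hfree; simp at hfree; exact hfree hin
      have hex1 : ∃ m : Nat, m < f ∧ pvCand name ((v + 1) + (m : Int)) ∉ dd1.keys := by
        refine ⟨n - 1, by omega, ?_⟩
        rw [hk1]
        have : (v + 1) + ((n - 1 : Nat) : Int) = v + (n : Int) := by
          push_cast [Nat.cast_sub (by omega : 1 ≤ n)]; ring
        rw [this]; exact hfree
      obtain ⟨k, hk_le, hk_free, hk_all, hk_get, hk_keys, hk_other⟩ := ih dd1 (v + 1) hg1 hex1
      refine ⟨k, by omega, by rwa [hk1] at hk_free, ?_, hk_get, by rw [hk_keys, hk1], ?_⟩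
      · intro j hj1 hj2
        rcases eq_or_lt_of_le hj1 with rfl | hlt
        · exact hin
        · have := hk_all j (by omega) hj2
          rwa [hk1] at this
      · intro s hs
        rw [hk_other s hs, hdd1, PySem.Dict.get?_insert_of_ne _ _ hs]
    · rw [if_neg hc]
      rw [hgd] at hc
      refine ⟨v, le_refl _, ?_, by omega, hv, rfl, fun _ _ => rfl⟩
      rw [← PySem.Dict.contains_iff_mem_keys, PySem.Dict.contains_eq_isSome_get?]
      simpa using hc

theorem pvScanB_spec (seen : PySem.Set String) (name : String) :
    ∀ (fuel : Nat) (k0 : Int),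
      (∃ n : Nat, n < fuel ∧ pvCand name (k0 + (n : Int)) ∉ seen) →
      k0 ≤ pvScanB seen name k0 fuel ∧ pvCand name (pvScanB seen name k0 fuel) ∉ seen ∧
        (∀ j : Int, k0 ≤ j → j < pvScanB seen name k0 fuel → pvCand name j ∈ seen) := by
  intro fuel
  induction fuel with
  | zero => intro k0 ⟨n, hn, _⟩; omega
  | succ f ih =>
    intro k0 hex
    rw [pvScanB]
    by_cases hc : PySem.Set.contains seen (pvCand name k0) = true
    · rw [if_pos hc]
      have hin : pvCand name k0 ∈ seen := (PySem.Set.contains_iff _ _).mp hc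
      obtain ⟨n, hn, hfree⟩ := hex
      have hn0 : n ≠ 0 := by
        intro h0; rw [h0] at hfree; simp at hfree; exact hfree hin
      have hex1 : ∃ m : Nat, m < f ∧ pvCand name ((k0 + 1) + (m : Int)) ∉ seen := by
        refine ⟨n - 1, by omega, ?_⟩
        have : (k0 + 1) + ((n - 1 : Nat) : Int) = k0 + (n : Int) := by
          push_cast [Nat.cast_sub (by omega : 1 ≤ n)]; ring
        rw [this]; exact hfree
      obtain ⟨h1, h2, h3⟩ := ih (k0 + 1) hex1
      refine ⟨by omega, h2, ?_⟩
      intro j hj1 hj2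
      rcases eq_or_lt_of_le hj1 with rfl | hlt
      · exact hin
      · exact h3 j (by omega) hj2
    · rw [if_neg hc]
      refine ⟨le_refl _, ?_, by omega⟩
      intro hmem
      exact hc ((PySem.Set.contains_iff _ _).mpr hmem)

-- the invariant tying A's dict to B's set
def pvInv (dd : PySem.Dict String Int) (seen : PySem.Set String) : Prop :=
  dd.keys = seen ∧
  ∀ nm v, dd.get? nm = some v → 1 ≤ v ∧ ∀ j : Int, 1 ≤ j → j < v → pvCand nm j ∈ seen

theorem pvStep_agree (dd : PySem.Dict String Int) (seen : PySem.Set String)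
    (ans : List String) (name : String) (hinv : pvInv dd seen) :
    ∃ dd' seen' x, pvStepA (dd, ans) name = (dd', ans ++ [x]) ∧
      pvStepB (seen, ans) name = (seen', ans ++ [x]) ∧ pvInv dd' seen' := by
  obtain ⟨hkeys, hcnt⟩ := hinv
  cases hg : dd.get? name with
  | none =>
    have hnm : name ∉ seen := by
      rw [← hkeys]; exact (PySem.Dict.get?_eq_none_iff_not_mem_keys _ _).mp hg
    refine ⟨dd.insert name 1, seen ++ [name], name, ?_, ?_, ?_, ?_⟩
    · simp [pvStepA, hg]
    · simp [pvStepB, PySem.Set.add, hnm]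
    · rw [PySem.Dict.keys_insert_of_not_contains _ _
        (by rw [PySem.Dict.contains_eq_isSome_get?, hg]; rfl), hkeys]
    · intro nm v hv
      rw [PySem.Dict.get?_insert] at hv
      split_ifs at hv with he
      · cases hv; exact ⟨by omega, by intro j h1 h2; omega⟩
      · obtain ⟨h1, h2⟩ := hcnt nm v hv
        exact ⟨h1, fun j hj1 hj2 => List.mem_append_left _ (h2 j hj1 hj2)⟩
  | some v =>
    obtain ⟨hv1, hall⟩ := hcnt name v hg
    have hnm : name ∈ seen := by
      rw [← hkeys, ← PySem.Dict.contains_iff_mem_keys, PySem.Dict.contains_eq_isSome_get?, hg]; rfl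
    have hcb : PySem.Set.contains seen name = true := (PySem.Set.contains_iff _ _).mpr hnm
    -- A's loop
    have hklen : dd.keys.length = dd.size := by
      simp [PySem.Dict.keys, PySem.Dict.size]
    obtain ⟨nA, hnA, hfreeA⟩ := pvExistsFree dd.keys name v hv1
    obtain ⟨kA, hkA_le, hkA_free, hkA_all, hkA_get, hkA_keys, hkA_other⟩ :=
      pvLoopA_spec name (dd.size + 1) dd v hg ⟨nA, by omega, hfreeA⟩
    -- B's scan
    obtain ⟨nB, hnB, hfreeB⟩ := pvExistsFree seen name 1 (le_refl _)
    obtain ⟨hkB_le, hkB_free, hkB_all⟩ :=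
      pvScanB_spec seen name (seen.length + 1) 1 ⟨nB, by omega, hfreeB⟩
    set kB := pvScanB seen name 1 (seen.length + 1) with hkB
    -- the two indices agree
    have hkeq : kA = kB := by
      rcases lt_trichotomy kA kB with h | h | h
      · exact absurd (hkB_all kA (by omega) h) (by rwa [hkeys] at hkA_free)
      · exact h
      · by_cases hvB : kB < v
        · exact absurd (hall kB (by omega) hvB) hkB_free
        · exact absurd (by rw [← hkeys]; exact hkA_all kB (by omega) h) hkB_free
    set dd' := pvLoopA name dd (dd.size + 1) with hdd'
    have hgd' : dd'.getD name 0 = kA := PySem.Dict.getD_of_get?_eq_some _ 0 hkA_get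
    set newName := pvCand name kA with hnew
    have hnewNotSeen : newName ∉ seen := by rw [← hkeys]; exact hkA_free
    have hselfne : newName ≠ name := pvCand_ne_name name kA
    -- first insert keeps keys
    have hk1 : (dd'.insert name (kA + 1)).keys = dd.keys := by
      rw [PySem.Dict.keys_insert_of_contains _ _
        (by rw [PySem.Dict.contains_eq_isSome_get?, hkA_get]; rfl), hkA_keys]
    have hnewNotC : (dd'.insert name (kA + 1)).contains newName = false := by
      have : newName ∉ (dd'.insert name (kA + 1)).keys := by rw [hk1, hkeys]; exact hnewNotSeen
      simpa using (fun h => this ((PySem.Dict.contains_iff_mem_keys _ _).mp h))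
    refine ⟨(dd'.insert name (kA + 1)).insert newName 1, seen ++ [newName], newName, ?_, ?_, ?_, ?_⟩
    · simp only [pvStepA, hg]
      rw [← hdd', hgd']
    · simp only [pvStepB, hcb, if_pos]
      rw [← hkB, ← hkeq, ← hnew, PySem.Set.add, if_neg (by
        simpa using (fun h => hnewNotSeen ((PySem.Set.contains_iff _ _).mp h)))]
    · rw [PySem.Dict.keys_insert_of_not_contains _ _ hnewNotC, hk1, hkeys]
    · intro nm w hw
      rw [PySem.Dict.get?_insert] at hw
      split_ifs at hw with he1
      · cases hw
        exact ⟨by omega, fun j h1 h2 => by omega⟩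
      · rw [PySem.Dict.get?_insert] at hw
        split_ifs at hw with he2
        · cases hw
          subst he2
          refine ⟨by omega, fun j hj1 hj2 => ?_⟩
          by_cases hjk : j = kA
          · subst hjk; exact List.mem_append_right _ (by simp [hnew])
          · by_cases hjv : j < v
            · exact List.mem_append_left _ (hall j hj1 hjv)
            · exact List.mem_append_left _ (by
                rw [← hkeys]; exact hkA_all j (by omega) (by omega))
        · rw [hkA_other nm he2] at hw
          obtain ⟨h1, h2⟩ := hcnt nm w hw
          exact ⟨h1, fun j hj1 hj2 => List.mem_append_left _ (h2 j hj1 hj2)⟩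

theorem pvFold_agree (names : List String) :
    ∀ (dd : PySem.Dict String Int) (seen : PySem.Set String) (ans : List String),
      pvInv dd seen →
      (names.foldl pvStepA (dd, ans)).2 = (names.foldl pvStepB (seen, ans)).2 := by
  induction names with
  | nil => intro dd seen ans _; rfl
  | cons nm rest ih =>
    intro dd seen ans hinv
    obtain ⟨dd', seen', x, hA, hB, hinv'⟩ := pvStep_agree dd seen ans nm hinv
    rw [List.foldl_cons, List.foldl_cons, hA, hB]
    exact ih dd' seen' (ans ++ [x]) hinv'

-- ===== VERDICT (by name: the statement is the Claim_ definition above) =====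
theorem getFolderNames_spec : Claim_equal_getFolderNames := by
  intro names _
  unfold Spec_getFolderNames getFolderNames getFolderNames_alt
  apply pvFold_agree
  constructor
  · simp [PySem.Dict.keys_empty, PySem.Set.empty]
  · intro nm v h
    simp [PySem.Dict.get?_empty] at h
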